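-- pv_equiv track=rewrite | github.com/VladimirShubinkin/Polyakov | 5/5.338_1.py | get_sums
-- ===== SOURCE A (Python) =====
-- def get_sums(n: int) -> (int, int, int):
--     digit_count = 0
--     s = [0, 0]
--     while n:
--         digit_count += 1
--         s[digit_count % 2] += n % 45
--         n //= 45
--     return min(s), max(s), digit_count
-- ===== SOURCE B (Python) =====
-- def _sums(n):
--     # returns (sum of even-position base-45 digits, sum of odd-position digits, digit count)
--     if n == 0:
--         return (0, 0, 0)
--     e, o, c = _sums(n // 45)
--     return (n % 45 + o, e, c + 1)
--
-- def get_sums(n: int) -> (int, int, int):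
--     e, o, c = _sums(n)
--     return (min(o, e), max(o, e), c)
-- ===== Notes on version B (the rewrite author's own statement) =====
-- stated objective: alternative
-- what changed: Replaces the fused while-loop with a digit-count accumulator and an indexed two-cell list by a recursion on n//45 that returns the raw even-position and odd-position digit sums (parities swapping at each level), with min/max taken once at the top.
import Mathlib
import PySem

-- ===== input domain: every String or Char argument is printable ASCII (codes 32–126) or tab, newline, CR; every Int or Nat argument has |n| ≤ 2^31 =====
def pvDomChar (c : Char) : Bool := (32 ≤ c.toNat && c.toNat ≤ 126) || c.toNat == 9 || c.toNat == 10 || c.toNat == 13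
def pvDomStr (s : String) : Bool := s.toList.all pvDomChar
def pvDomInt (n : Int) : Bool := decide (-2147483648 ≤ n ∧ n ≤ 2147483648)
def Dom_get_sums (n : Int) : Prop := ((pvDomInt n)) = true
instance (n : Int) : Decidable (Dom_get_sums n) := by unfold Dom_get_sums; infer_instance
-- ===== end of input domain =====

-- B replaces A's fused while-loop (digit counter + indexed two-cell accumulator list) by a
-- recursion on n // 45 returning raw even-/odd-position digit sums, min/max taken once at the top.

-- ===== PORT A =====
-- A's while-loop, with the two cells of s as s0/s1 and fuel n.toNat (enough iterations for n ≥ 0)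
def get_sums_go (fuel : Nat) (n digit_count s0 s1 : Int) : Int × Int × Int :=
  match fuel with
  | 0 => (min s0 s1, max s0 s1, digit_count)
  | f + 1 =>
    if n = 0 then (min s0 s1, max s0 s1, digit_count)
    else
      let dc := digit_count + 1
      if PySem.Int.mod dc 2 = 1 then
        get_sums_go f (PySem.Int.floordiv n 45) dc s0 (s1 + PySem.Int.mod n 45)
      else
        get_sums_go f (PySem.Int.floordiv n 45) dc (s0 + PySem.Int.mod n 45) s1

def get_sums (n : Int) : Int × Int × Int :=
  get_sums_go n.toNat n 0 0 0

-- ===== PORT B =====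
-- B's recursive helper _sums: (even-position digit sum, odd-position digit sum, count); fuel n.toNat
def sums_go (fuel : Nat) (n : Int) : Int × Int × Int :=
  match fuel with
  | 0 => (0, 0, 0)
  | f + 1 =>
    if n = 0 then (0, 0, 0)
    else
      let (e, o, c) := sums_go f (PySem.Int.floordiv n 45)
      (PySem.Int.mod n 45 + o, e, c + 1)

def get_sums_alt (n : Int) : Int × Int × Int :=
  let (e, o, c) := sums_go n.toNat n
  (min o e, max o e, c)

-- ===== PRECONDITION & SPEC =====
-- A's while-loop never terminates for n < 0 (n //= 45 stays negative), so Pre_ admits exactly n ≥ 0.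
def Pre_get_sums (n : Int) : Prop := 0 ≤ n
instance (n : Int) : Decidable (Pre_get_sums n) := by unfold Pre_get_sums; infer_instance
def pvWitness_get_sums : Int := (2025)

def Spec_get_sums (n : Int) (out : Int × Int × Int) : Prop := out = get_sums_alt n
instance (n : Int) (out : Int × Int × Int) : Decidable (Spec_get_sums n out) := by unfold Spec_get_sums; infer_instance

-- ===== CLAIM (what is proved, stated in full; the proofs are below) =====
def Claim_equal_get_sums : Prop := ∀ (n : Int), Dom_get_sums n → Pre_get_sums n → Spec_get_sums n (get_sums n)

-- ===== LEMMAS AND PROOFS =====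

theorem floordiv_lt_self {n : Int} (h : 0 < n) : PySem.Int.floordiv n 45 < n := by
  rw [PySem.Int.floordiv_eq_ediv_of_pos (by norm_num)]
  omega

theorem floordiv_nonneg {n : Int} (h : 0 ≤ n) : 0 ≤ PySem.Int.floordiv n 45 := by
  rw [PySem.Int.floordiv_eq_ediv_of_pos (by norm_num)]
  exact Int.ediv_nonneg h (by norm_num)

-- Loop/recursion correspondence: A's loop from state (dc, s0, s1) adds B's odd-position sum
-- to the cell the next digit does NOT land in, depending on the parity of dc.
theorem go_eq (fuel : Nat) : ∀ (n dc s0 s1 : Int), 0 ≤ n → n ≤ (fuel : Int) →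
    get_sums_go fuel n dc s0 s1 =
      (if PySem.Int.mod dc 2 = 0 then
        (min (s0 + (sums_go fuel n).2.1) (s1 + (sums_go fuel n).1),
         max (s0 + (sums_go fuel n).2.1) (s1 + (sums_go fuel n).1),
         dc + (sums_go fuel n).2.2)
      else
        (min (s0 + (sums_go fuel n).1) (s1 + (sums_go fuel n).2.1),
         max (s0 + (sums_go fuel n).1) (s1 + (sums_go fuel n).2.1),
         dc + (sums_go fuel n).2.2)) := by
  induction fuel with
  | zero =>
    intro n dc s0 s1 h0 hf
    have : n = 0 := le_antisymm (by exact_mod_cast hf) h0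
    subst this
    simp [get_sums_go, sums_go]
  | succ f ih =>
    intro n dc s0 s1 h0 hf
    by_cases hn : n = 0
    · subst hn
      simp [get_sums_go, sums_go]
    · have hpos : 0 < n := lt_of_le_of_ne h0 (Ne.symm hn)
      have h0' : 0 ≤ PySem.Int.floordiv n 45 := floordiv_nonneg h0
      have hf' : PySem.Int.floordiv n 45 ≤ (f : Int) := by
        have := floordiv_lt_self hpos
        push_cast at hf ⊢; omega
      have hmod : PySem.Int.mod dc 2 = dc % 2 := PySem.Int.mod_eq_emod_of_pos (by norm_num)
      have hmod1 : PySem.Int.mod (dc + 1) 2 = (dc + 1) % 2 := PySem.Int.mod_eq_emod_of_pos (by norm_num)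
      have ihh := fun s0' s1' => ih (PySem.Int.floordiv n 45) (dc + 1) s0' s1' h0' hf'
      rcases hq : sums_go f (PySem.Int.floordiv n 45) with ⟨e, o, c⟩
      simp only [get_sums_go, sums_go, hn, hq]
      by_cases hdc : dc % 2 = 0
      · have h1 : (dc + 1) % 2 = 1 := by omega
        rw [hmod1, h1]
        rw [ihh s0 (s1 + PySem.Int.mod n 45)]
        rw [hmod1, h1]
        simp only [hq, if_neg (by norm_num : (1:Int) ≠ 0), hmod, hdc, if_true, if_false, Prod.mk.injEq]
        exact ⟨by rw [add_assoc], by rw [add_assoc], by omega⟩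
      · have h1 : (dc + 1) % 2 = 0 := by omega
        have hdc1 : dc % 2 = 1 := by omega
        rw [hmod1, h1]
        simp only [if_neg (by norm_num : (0:Int) ≠ 1)]
        rw [ihh (s0 + PySem.Int.mod n 45) s1]
        rw [hmod1, h1]
        simp only [hq, hmod, hdc1, if_neg (by norm_num : (1:Int) ≠ 0), if_true, if_false, Prod.mk.injEq]
        exact ⟨by rw [add_assoc], by rw [add_assoc], by omega⟩

-- ===== VERDICT (by name: the statement is the Claim_ definition above) =====
theorem get_sums_spec : Claim_equal_get_sums := by
  intro n _ hpre
  unfold Spec_get_sums get_sums get_sums_alt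
  have hle : n ≤ (n.toNat : Int) := by omega
  rw [go_eq n.toNat n 0 0 0 hpre hle]
  have : PySem.Int.mod (0 : Int) 2 = 0 := by decide
  rw [this]
  rcases h : sums_go n.toNat n with ⟨e, o, c⟩
  simp
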